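-- pv_equiv track=rewrite | github.com/yintao1995/hyperspectral_data_viewer | seeking_deep.py | cut_list
-- ===== SOURCE A (Python) =====
-- def cut_list(list_a, x1, x2):
--     """
--     Give an increasing sequence, find the chosen section which satisfy: x1<x<x2.
--
--     :param list_a:   List[num]
--     :param x1:       num
--     :param x2:       num
--     :return:    Tuple, index at start and end
--     """
--     index1 = index2 = 0
--     for i in range(len(list_a)):
--         if list_a[i] < x1:
--             pass
--         else:
--             index1 = i
--             break
--     if list_a[-1] < x2:
--         return index1, -1
--     for i in range(index1, len(list_a)):
--         if list_a[i] < x2: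
--             pass
--         else:
--             index2 = i
--             break
--     return index1, index2
-- ===== SOURCE B (Python) =====
-- def cut_list(list_a, x1, x2):
--     # One forward pass (vs A's two sequential scans): track the first index
--     # reaching x1, the first index reaching x2 at/after it, and the first
--     # index reaching x2 anywhere (used when no element reaches x1).
--     i1 = i2_after = i2_all = None
--     for i, v in enumerate(list_a):
--         if i1 is None and v >= x1:
--             i1 = i
--         if i2_after is None and i1 is not None and v >= x2:
--             i2_after = i
--         if i2_all is None and v >= x2:
--             i2_all = i
--     index1 = i1 if i1 is not None else 0
--     if list_a[-1] < x2:
--         return index1, -1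
--     index2 = i2_after if i1 is not None else i2_all
--     return index1, index2 if index2 is not None else 0
-- ===== Notes on version B (the rewrite author's own statement) =====
-- stated objective: alternative
-- what changed: A makes two sequential forward index scans (one for x1, then one from index1 for x2); B makes a single forward pass over enumerate(list_a) tracking the first x1-hit, the first x2-hit at/after it, and the first x2-hit overall, combining them at the end.
-- outside the precondition, e.g. on cut_list([], 0, 1): A raises IndexError, B raises IndexError
import Mathlib
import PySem

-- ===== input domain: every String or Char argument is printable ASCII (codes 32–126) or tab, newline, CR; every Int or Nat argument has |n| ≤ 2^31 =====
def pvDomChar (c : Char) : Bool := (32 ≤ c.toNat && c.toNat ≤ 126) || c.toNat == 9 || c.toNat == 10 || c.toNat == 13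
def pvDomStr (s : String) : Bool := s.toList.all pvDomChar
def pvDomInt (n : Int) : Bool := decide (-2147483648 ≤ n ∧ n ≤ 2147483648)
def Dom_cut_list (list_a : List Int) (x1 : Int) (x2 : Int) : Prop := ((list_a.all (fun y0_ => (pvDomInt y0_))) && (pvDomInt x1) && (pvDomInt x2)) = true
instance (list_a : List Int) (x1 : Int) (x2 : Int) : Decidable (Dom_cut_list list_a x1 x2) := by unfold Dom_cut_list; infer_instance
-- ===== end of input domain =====

-- B replaces A's two sequential forward scans by a single forward pass that
-- tracks all needed first-match indices at once (objective: alternative, one pass).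

-- ===== PORT A =====
-- A's 'for i in range(start, len)'-loop with break: first index i ≥ start with ¬(a[i] < x)
def scanA (a : List Int) (x : Int) (i : Nat) : Option Nat :=
  if h : i < a.length then
    if a[i] < x then scanA a x (i + 1) else some i
  else none
termination_by a.length - i

def cut_list (list_a : List Int) (x1 : Int) (x2 : Int) : List Int :=
  let index1 : Nat := (scanA list_a x1 0).getD 0
  match PySem.List.pyGet? list_a (-1) with
  | none => []   -- list_a[-1] raises IndexError on []; excluded by Pre_
  | some last =>
    if last < x2 then [(index1 : Int), -1]
    else
      let index2 : Nat := (scanA list_a x2 index1).getD 0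
      [(index1 : Int), (index2 : Int)]

-- ===== PORT B =====
-- one step of Source B's single loop over enumerate(list_a); state = (i1, i2_after, i2_all)
def stepB (x1 x2 : Int) (s : Option Int × Option Int × Option Int) (p : Int × Int) :
    Option Int × Option Int × Option Int :=
  let i1 := if s.1 = none ∧ x1 ≤ p.2 then some p.1 else s.1
  let i2a := if s.2.1 = none ∧ i1 ≠ none ∧ x2 ≤ p.2 then some p.1 else s.2.1
  let i2all := if s.2.2 = none ∧ x2 ≤ p.2 then some p.1 else s.2.2
  (i1, i2a, i2all)

def cut_list_alt (list_a : List Int) (x1 : Int) (x2 : Int) : List Int :=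
  let s := (PySem.List.enumerate list_a).foldl (stepB x1 x2) (none, none, none)
  let index1 : Int := s.1.getD 0
  match PySem.List.pyGet? list_a (-1) with
  | none => []   -- list_a[-1] raises IndexError on []; excluded by Pre_
  | some last =>
    if last < x2 then [index1, -1]
    else
      let index2 := match s.1 with
        | some _ => s.2.1
        | none => s.2.2
      [index1, index2.getD 0]

-- ===== PRECONDITION & SPEC =====
-- Pre_ excludes only the empty list, on which A raises IndexError at list_a[-1].
def Pre_cut_list (list_a : List Int) (x1 : Int) (x2 : Int) : Prop := list_a ≠ []
instance (list_a : List Int) (x1 : Int) (x2 : Int) : Decidable (Pre_cut_list list_a x1 x2) := by unfold Pre_cut_list; infer_instance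
def pvWitness_cut_list : List Int × Int × Int := ([1, 2, 3], 1, 3)

def Spec_cut_list (list_a : List Int) (x1 : Int) (x2 : Int) (out : List Int) : Prop := out = cut_list_alt list_a x1 x2
instance (list_a : List Int) (x1 : Int) (x2 : Int) (out : List Int) : Decidable (Spec_cut_list list_a x1 x2 out) := by unfold Spec_cut_list; infer_instance

-- ===== CLAIM (what is proved, stated in full; the proofs are below) =====
def Claim_equal_cut_list : Prop := ∀ (list_a : List Int) (x1 : Int) (x2 : Int), Dom_cut_list list_a x1 x2 → Pre_cut_list list_a x1 x2 → Spec_cut_list list_a x1 x2 (cut_list list_a x1 x2)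

-- ===== LEMMAS AND PROOFS =====

-- first index k' ≥ k (absolute position, positions counted from k) with x ≤ v
def firstGE (x : Int) : List Int → Int → Option Int
  | [], _ => none
  | v :: t, k => if x ≤ v then some k else firstGE x t (k + 1)

-- first x2-match at or after the first x1-match
def firstAfter (x1 x2 : Int) : List Int → Int → Option Int
  | [], _ => none
  | v :: t, k =>
    if x1 ≤ v then (if x2 ≤ v then some k else firstGE x2 t (k + 1))
    else firstAfter x1 x2 t (k + 1)

theorem firstGE_ge (x : Int) : ∀ (l : List Int) (k p : Int), firstGE x l k = some p → k ≤ p := by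
  intro l
  induction l with
  | nil => intro k p h; simp [firstGE] at h
  | cons v t ih =>
    intro k p h
    simp only [firstGE] at h
    split at h
    · cases h; omega
    · have := ih (k + 1) p h; omega

theorem scanA_cast_aux (a : List Int) (x : Int) : ∀ (d i : Nat), a.length ≤ i + d →
    (scanA a x i).map (fun n => (n : Int)) = firstGE x (a.drop i) (i : Int) := by
  intro d
  induction d with
  | zero =>
    intro i hd
    have h1 : ¬ i < a.length := by omega
    have h2 : a.length ≤ i := by omega
    rw [scanA]
    simp [h1, List.drop_eq_nil_of_le h2, firstGE]
  | succ d ih =>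
    intro i hd
    by_cases h : i < a.length
    · rw [List.drop_eq_getElem_cons h, scanA]
      simp only [h, dif_pos]
      by_cases hx : a[i] < x
      · rw [if_pos hx]
        rw [ih (i + 1) (by omega)]
        simp only [firstGE, if_neg (by omega : ¬ x ≤ a[i])]
        norm_num
      · have h2 : x ≤ a[i] := by omega
        simp [hx, firstGE, h2]
    · rw [scanA]
      simp [h, List.drop_eq_nil_of_le (by omega : a.length ≤ i), firstGE]

theorem scanA_cast (a : List Int) (x : Int) (i : Nat) :
    (scanA a x i).map (fun n => (n : Int)) = firstGE x (a.drop i) (i : Int) :=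
  scanA_cast_aux a x a.length i (by omega)

theorem frozen (x1 x2 : Int) : ∀ (l : List Int) (k a b c : Int),
    (PySem.List.enumerate l k).foldl (stepB x1 x2) (some a, some b, some c) = (some a, some b, some c) := by
  intro l
  induction l with
  | nil => intro k a b c; simp [PySem.List.enumerate_nil]
  | cons v t ih =>
    intro k a b c
    rw [PySem.List.enumerate_cons]
    simp only [List.foldl_cons, stepB]
    simp
    exact ih (k + 1) a b c

theorem foldL2 (x1 x2 : Int) : ∀ (l : List Int) (k : Int) (j : Int) (om : Option Int),
    (PySem.List.enumerate l k).foldl (stepB x1 x2) (some j, none, om) =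
      (some j, firstGE x2 l k, om.orElse (fun _ => firstGE x2 l k)) := by
  intro l
  induction l with
  | nil => intro k j om; cases om <;> simp [PySem.List.enumerate_nil, firstGE, Option.orElse]
  | cons v t ih =>
    intro k j om
    rw [PySem.List.enumerate_cons]
    simp only [List.foldl_cons, stepB]
    by_cases hx : x2 ≤ v
    · cases om with
      | none =>
        simp [hx, frozen, firstGE, Option.orElse]
      | some c =>
        simp [hx, frozen, firstGE, Option.orElse]
    · cases om with
      | none => simp [hx, ih, firstGE, Option.orElse]
      | some c => simp [hx, ih, firstGE, Option.orElse]

theorem foldL1 (x1 x2 : Int) : ∀ (l : List Int) (k : Int) (om : Option Int),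
    (PySem.List.enumerate l k).foldl (stepB x1 x2) (none, none, om) =
      (firstGE x1 l k, firstAfter x1 x2 l k, om.orElse (fun _ => firstGE x2 l k)) := by
  intro l
  induction l with
  | nil => intro k om; cases om <;> simp [PySem.List.enumerate_nil, firstGE, firstAfter, Option.orElse]
  | cons v t ih =>
    intro k om
    rw [PySem.List.enumerate_cons]
    simp only [List.foldl_cons, stepB]
    by_cases h1 : x1 ≤ v <;> by_cases h2 : x2 ≤ v
    · cases om <;> simp [h1, h2, frozen, firstGE, firstAfter, Option.orElse]
    · cases om <;> simp [h1, h2, foldL2, firstGE, firstAfter, Option.orElse]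
    · cases om <;> simp [h1, h2, ih, firstGE, firstAfter, Option.orElse]
    · cases om <;> simp [h1, h2, ih, firstGE, firstAfter, Option.orElse]

theorem firstAfter_char (x1 x2 : Int) : ∀ (l : List Int) (k p : Int),
    firstGE x1 l k = some p →
    firstAfter x1 x2 l k = firstGE x2 (l.drop (p - k).toNat) p := by
  intro l
  induction l with
  | nil => intro k p h; simp [firstGE] at h
  | cons v t ih =>
    intro k p h
    simp only [firstGE] at h
    simp only [firstAfter]
    split at h
    · rename_i hx
      cases h
      simp [hx, firstGE]
    · rename_i hx
      have hp := firstGE_ge x1 t (k + 1) p h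
      rw [if_neg hx]
      rw [ih (k + 1) p h]
      have : (p - k).toNat = (p - (k + 1)).toNat + 1 := by omega
      rw [this, List.drop_succ_cons]

-- ===== VERDICT (by name: the statement is the Claim_ definition above) =====
theorem getD_cast (o : Option Nat) : (((o.getD 0 : Nat)) : Int) = (o.map (fun n => (n : Int))).getD 0 := by
  cases o <;> simp

theorem cut_list_spec : Claim_equal_cut_list := by
  intro la x1 x2 _ pre
  unfold Spec_cut_list cut_list cut_list_alt
  have hc1 := scanA_cast la x1 0
  simp only [List.drop_zero, Nat.cast_zero] at hc1
  have key1 : (((scanA la x1 0).getD 0 : Nat) : Int) = (firstGE x1 la 0).getD 0 := by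
    rw [getD_cast, hc1]
  cases hlast : PySem.List.pyGet? la (-1) with
  | none =>
    exact absurd (List.getLast?_eq_none_iff.mp ((PySem.List.pyGet?_neg_one la).symm.trans hlast)) pre
  | some last =>
    by_cases hx : last < x2
    · simp [foldL1, hx, key1]
    · cases hf : firstGE x1 la 0 with
      | none =>
        have hs1 : scanA la x1 0 = none := by
          rw [hf] at hc1
          cases hs : scanA la x1 0 with
          | none => rfl
          | some n => rw [hs] at hc1; simp at hc1
        have hc2 := scanA_cast la x2 0
        simp only [List.drop_zero, Nat.cast_zero] at hc2
        have key2 : (((scanA la x2 0).getD 0 : Nat) : Int) = (firstGE x2 la 0).getD 0 := by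
          rw [getD_cast, hc2]
        simp [foldL1, hx, hf, hs1, key2]
      | some p =>
        obtain ⟨n, hsn, hnp⟩ : ∃ n, scanA la x1 0 = some n ∧ (n : Int) = p := by
          rw [hf] at hc1
          cases hs : scanA la x1 0 with
          | none => rw [hs] at hc1; simp at hc1
          | some n => rw [hs] at hc1; simp at hc1; exact ⟨n, rfl, hc1⟩
        have hfa := firstAfter_char x1 x2 la 0 p hf
        have htn : (p - 0).toNat = n := by omega
        rw [htn] at hfa
        have hc2 := scanA_cast la x2 n
        rw [hnp] at hc2
        have key2 : (((scanA la x2 n).getD 0 : Nat) : Int) = (firstAfter x1 x2 la 0).getD 0 := by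
          rw [hfa, ← hc2, getD_cast]
        simp [foldL1, hx, hf, hsn, key2, hnp]
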